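-- pv_equiv track=rewrite | github.com/WSm-77/algorithms_and_data_structures | exams/2023-24/term1/B/egz1b_best.py | kstrong
-- ===== SOURCE A (Python) =====
-- def kstrong( T, k):
--   # tu prosze wpisac wlasna implementacje
--
--   n = len(T)
--   f = [[0 for _ in range(n)] for _ in range(k+1)]
--
--   f[0][0] = T[0]
--
--   for i in range(1, n):
--     f[0][i] = max(0, f[0][i-1]) + T[i]
--
--   for currK in range(1, k+1):
--     f[currK][0] = T[0]
--     for i in range(1, n):
--       f[currK][i] = max(max(0, f[currK][i - 1]) + T[i], f[currK - 1][i - 1])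
--
--   return max(f[k])
-- ===== SOURCE B (Python) =====
-- def kstrong(T, k):
--     # top-down memoized recursion over the same states, filled depth-first on demand
--     memo = {}
--
--     def best(c, i):
--         key = (c, i)
--         if key in memo:
--             return memo[key]
--         if i == 0:
--             v = T[0]
--         elif c == 0:
--             v = max(0, best(0, i - 1)) + T[i]
--         else:
--             v = max(max(0, best(c, i - 1)) + T[i], best(c - 1, i - 1))
--         memo[key] = v
--         return v
--
--     return max(best(k, i) for i in range(len(T)))
-- ===== Notes on version B (the rewrite author's own statement) =====
-- stated objective: alternative
-- what changed: Replaces the two explicit bottom-up nested sweeps over a preallocated (k+1) x n table with a top-down recursion best(c,i) that fills states depth-first on demand, caching each state in a dict, and takes the max of best(k,i) over i.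
import Mathlib
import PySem

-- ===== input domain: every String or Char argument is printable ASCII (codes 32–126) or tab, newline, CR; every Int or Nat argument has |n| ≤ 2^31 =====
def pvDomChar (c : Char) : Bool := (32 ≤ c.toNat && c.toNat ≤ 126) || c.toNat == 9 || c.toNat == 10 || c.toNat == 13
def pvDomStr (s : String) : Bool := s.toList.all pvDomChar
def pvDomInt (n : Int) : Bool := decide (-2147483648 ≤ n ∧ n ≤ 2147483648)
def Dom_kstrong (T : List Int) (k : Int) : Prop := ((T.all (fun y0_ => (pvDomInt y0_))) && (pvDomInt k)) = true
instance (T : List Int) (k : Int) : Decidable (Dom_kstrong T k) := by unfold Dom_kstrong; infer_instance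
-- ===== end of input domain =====

-- B replaces A's two bottom-up nested sweeps over a preallocated (k+1) x n table with a
-- top-down memoized recursion that fills states depth-first on demand (same values, no table).

-- ===== PORT A =====
-- literal transliteration of A: preallocate the (k+1) x n zero table, set f[0][0],
-- fill row 0, then each row currK = 1..k, finally max(f[k]).
-- T[i] / f[c][i] accesses are via getD; within Pre_ every index is in range
-- (the getD defaults merely make the computation total).
def kstrong (T : List Int) (k : Int) : Int :=
  let n := T.length
  let f : List (List Int) := List.replicate ((k+1).toNat) (List.replicate n 0)
  let f := f.modify 0 (fun r => r.set 0 (T.getD 0 0))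
  let f := (List.range' 1 (n-1)).foldl (fun f i =>
      f.modify 0 (fun r => r.set i (max 0 (r.getD (i-1) 0) + T.getD i 0))) f
  let f := (List.range' 1 (k.toNat)).foldl (fun f currK =>
      let f := f.modify currK (fun r => r.set 0 (T.getD 0 0))
      (List.range' 1 (n-1)).foldl (fun f i =>
        let v := max (max 0 ((f.getD currK []).getD (i-1) 0) + T.getD i 0)
                     ((f.getD (currK-1) []).getD (i-1) 0)
        f.modify currK (fun r => r.set i v)) f) f
  (PySem.List.max? (f.getD k.toNat []) (fun y => y)).getD 0

-- ===== PORT B =====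
-- Source B's inner function best(c, i): check the memo dict first, otherwise compute the
-- branch (i == 0 base / c == 0 Kadane step / general step), store it under key (c, i),
-- return it; the memo dict is threaded explicitly (Python mutates the closure's dict).
def bestB (T : List Int) (c : Int) (i : Nat) (memo : PySem.Dict (Int × Int) Int) :
    Int × PySem.Dict (Int × Int) Int :=
  match memo.get? (c, (i : Int)) with
  | some v => (v, memo)
  | none =>
    match i with
    | 0 =>
      let v := T.getD 0 0
      (v, memo.insert (c, (i : Int)) v)
    | j+1 =>
      if c = 0 then
        let r := bestB T 0 j memo
        let v := max 0 r.1 + T.getD (j+1) 0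
        (v, r.2.insert (c, (i : Int)) v)
      else
        let r1 := bestB T c j memo
        let r2 := bestB T (c-1) j r1.2
        let v := max (max 0 r1.1 + T.getD (j+1) 0) r2.1
        (v, r2.2.insert (c, (i : Int)) v)

-- Source B's final line: max(best(k, i) for i in range(len(T))) — a fold over range(n)
-- keeping the running max (none before the first element) and the memo dict.
def stepD (T : List Int) (k : Int) :
    Option Int × PySem.Dict (Int × Int) Int → Nat → Option Int × PySem.Dict (Int × Int) Int :=
  fun p i =>
    let r := bestB T k i p.2
    (some (match p.1 with | none => r.1 | some b => max b r.1), r.2)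

def kstrong_alt (T : List Int) (k : Int) : Int :=
  (((List.range T.length).foldl (stepD T k) (none, PySem.Dict.empty)).1).getD 0
  -- max(()) on empty T raises in Source B; outside Pre_, the getD default is never used inside it

-- ===== PRECONDITION & SPEC =====
-- A raises IndexError on empty T (T[0]) and on negative k (the table f has no rows).
def Pre_kstrong (T : List Int) (k : Int) : Prop := T ≠ [] ∧ 0 ≤ k
instance (T : List Int) (k : Int) : Decidable (Pre_kstrong T k) := by unfold Pre_kstrong; infer_instance
def pvWitness_kstrong : List Int × Int := ([3, -1, 4, -5, 2], 1)

def Spec_kstrong (T : List Int) (k : Int) (out : Int) : Prop := out = kstrong_alt T k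
instance (T : List Int) (k : Int) (out : Int) : Decidable (Spec_kstrong T k out) := by unfold Spec_kstrong; infer_instance

-- ===== CLAIM (what is proved, stated in full; the proofs are below) =====
def Claim_equal_kstrong : Prop := ∀ (T : List Int) (k : Int), Dom_kstrong T k → Pre_kstrong T k → Spec_kstrong T k (kstrong T k)
-- ===== LEMMAS AND PROOFS =====

-- the common DP recurrence both programs compute: gsp T c i = f[c][i]
def gsp (T : List Int) : Nat → Nat → Int
  | _, 0 => T.getD 0 0
  | 0, (i+1) => max 0 (gsp T 0 i) + T.getD (i+1) 0
  | (c+1), (i+1) => max (max 0 (gsp T (c+1) i) + T.getD (i+1) 0) (gsp T c i)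
  termination_by c i => i

-- running maximum of row kk up to index m
def bmaxsp (T : List Int) (kk : Nat) : Nat → Int
  | 0 => gsp T kk 0
  | (m+1) => max (bmaxsp T kk m) (gsp T kk (m+1))

-- the fold bodies of port A, named for the lemmas
def stepA0 (T : List Int) : List (List Int) → Nat → List (List Int) :=
  fun f i => f.modify 0 (fun r => r.set i (max 0 (r.getD (i-1) 0) + T.getD i 0))

def stepAc (T : List Int) (currK : Nat) : List (List Int) → Nat → List (List Int) :=
  fun f i =>
    let v := max (max 0 ((f.getD currK []).getD (i-1) 0) + T.getD i 0)
                 ((f.getD (currK-1) []).getD (i-1) 0)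
    f.modify currK (fun r => r.set i v)

def outerA (T : List Int) (n : Nat) : List (List Int) → Nat → List (List Int) :=
  fun f currK =>
    (List.range' 1 (n-1)).foldl (stepAc T currK) (f.modify currK (fun r => r.set 0 (T.getD 0 0)))

theorem kstrong_unfold (T : List Int) (k : Int) :
    kstrong T k =
      (PySem.List.max? (((List.range' 1 k.toNat).foldl (outerA T T.length)
        ((List.range' 1 (T.length-1)).foldl (stepA0 T)
          ((List.replicate ((k+1).toNat) (List.replicate T.length 0)).modify 0
            (fun r => r.set 0 (T.getD 0 0))))).getD k.toNat []) (fun y => y)).getD 0 := rfl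

theorem getD_modify' (l : List (List Int)) (i j : Nat) (f : List Int → List Int) :
    (l.modify i f).getD j [] = if i = j ∧ j < l.length then f (l.getD j []) else l.getD j [] := by
  rcases Nat.lt_or_ge j l.length with h | h
  · simp [List.getD_eq_getElem?_getD, List.getElem?_modify, List.getElem?_eq_getElem h]
    split_ifs with h1 h2 <;> simp_all
  · simp [List.getD_eq_getElem?_getD, Nat.not_lt.mpr h]

theorem getD_set' (l : List Int) (i j : Nat) (v : Int) :
    (l.set i v).getD j 0 = if i = j ∧ i < l.length then v else l.getD j 0 := by
  simp [List.getD_eq_getElem?_getD, List.getElem?_set]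
  split_ifs with h1 h2 h3 <;> simp_all <;> try omega

theorem range_succ_cons (m : Nat) : List.range (m+1) = 0 :: List.range' 1 m := by
  rw [List.range_eq_range', List.range'_succ]

theorem range'_concat_one (s m : Nat) : List.range' s (m+1) = List.range' s m ++ [s + m] := by
  simpa using List.range'_concat (step := 1) (s := s) (n := m)

-- row-0 fill of port A
theorem row0_fill (T : List Int) (n : Nat) (f0 : List (List Int))
    (hpos : 0 < f0.length)
    (hr0len : (f0.getD 0 []).length = n)
    (hr0 : ∀ i, (f0.getD 0 []).getD i 0 = if i = 0 then gsp T 0 0 else 0) :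
    ∀ m, m ≤ n - 1 →
      (∀ c', c' ≠ 0 → ((List.range' 1 m).foldl (stepA0 T) f0).getD c' [] = f0.getD c' []) ∧
      ((List.range' 1 m).foldl (stepA0 T) f0).length = f0.length ∧
      ((((List.range' 1 m).foldl (stepA0 T) f0).getD 0 []).length = n) ∧
      (∀ i, (((List.range' 1 m).foldl (stepA0 T) f0).getD 0 []).getD i 0
          = if i ≤ m then gsp T 0 i else 0) := by
  intro m
  induction m with
  | zero =>
    intro _
    refine ⟨fun c' _ => rfl, rfl, hr0len, fun i => ?_⟩
    by_cases hi : i = 0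
    · subst hi; simpa using hr0 0
    · simp only [List.range'_zero, List.foldl_nil]
      rw [hr0 i, if_neg hi, if_neg (by omega)]
  | succ m ih =>
    intro hm
    obtain ⟨ih1, ih2, ih3, ih4⟩ := ih (by omega)
    rw [range'_concat_one, List.foldl_append]
    set f' := (List.range' 1 m).foldl (stepA0 T) f0 with hf'
    have hlen' : 0 < f'.length := ih2 ▸ hpos
    have h1m : 1 + m = m + 1 := Nat.add_comm 1 m
    simp only [List.foldl_cons, List.foldl_nil, stepA0, h1m]
    have hv : max 0 ((f'.getD 0 []).getD (m + 1 - 1) 0) + T.getD (m+1) 0 = gsp T 0 (m+1) := by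
      have : m + 1 - 1 = m := by omega
      rw [this, ih4 m, if_pos (le_refl m)]
      simp [gsp]
    refine ⟨?_, ?_, ?_, ?_⟩
    · intro c' hc'
      rw [getD_modify', if_neg (by exact fun h => hc' h.1.symm)]
      exact ih1 c' hc'
    · simp [List.length_modify, ih2]
    · rw [getD_modify', if_pos ⟨rfl, hlen'⟩, List.length_set]
      exact ih3
    · intro i
      rw [getD_modify', if_pos ⟨rfl, hlen'⟩, getD_set', hv]
      by_cases hi : i = m + 1
      · subst hi
        rw [if_pos ⟨rfl, by omega⟩, if_pos (le_refl _)]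
      · rw [if_neg (by exact fun h => hi h.1.symm), ih4 i]
        split_ifs <;> first | rfl | omega

-- row-currK fill of port A (currK = c+1)
theorem rowc_fill (T : List Int) (n : Nat) (c : Nat) (f0 : List (List Int))
    (hcK : c + 1 < f0.length)
    (hprev : ∀ i, ((f0.getD c []).getD i 0) = if i < n then gsp T c i else 0)
    (hrlen : (f0.getD (c+1) []).length = n)
    (hr : ∀ i, (f0.getD (c+1) []).getD i 0 = if i = 0 then gsp T (c+1) 0 else 0) :
    ∀ m, m ≤ n - 1 →
      (∀ c', c' ≠ c + 1 → ((List.range' 1 m).foldl (stepAc T (c+1)) f0).getD c' [] = f0.getD c' []) ∧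
      ((List.range' 1 m).foldl (stepAc T (c+1)) f0).length = f0.length ∧
      ((((List.range' 1 m).foldl (stepAc T (c+1)) f0).getD (c+1) []).length = n) ∧
      (∀ i, (((List.range' 1 m).foldl (stepAc T (c+1)) f0).getD (c+1) []).getD i 0
          = if i ≤ m then gsp T (c+1) i else 0) := by
  intro m
  induction m with
  | zero =>
    intro _
    refine ⟨fun c' _ => rfl, rfl, hrlen, fun i => ?_⟩
    by_cases hi : i = 0
    · subst hi; simpa using hr 0
    · simp only [List.range'_zero, List.foldl_nil]
      rw [hr i, if_neg hi, if_neg (by omega)]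
  | succ m ih =>
    intro hm
    obtain ⟨ih1, ih2, ih3, ih4⟩ := ih (by omega)
    rw [range'_concat_one, List.foldl_append]
    set f' := (List.range' 1 m).foldl (stepAc T (c+1)) f0 with hf'
    have hlen' : c + 1 < f'.length := ih2 ▸ hcK
    have h1m : 1 + m = m + 1 := Nat.add_comm 1 m
    simp only [List.foldl_cons, List.foldl_nil, stepAc, h1m]
    have hmn : m + 1 < n := by omega
    have hv : max (max 0 ((f'.getD (c+1) []).getD (m + 1 - 1) 0) + T.getD (m+1) 0)
        ((f'.getD (c+1-1) []).getD (m + 1 - 1) 0) = gsp T (c+1) (m+1) := by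
      have e1 : m + 1 - 1 = m := by omega
      have e2 : c + 1 - 1 = c := by omega
      rw [e1, e2, ih4 m, if_pos (le_refl m), ih1 c (by omega), hprev m, if_pos (by omega)]
      simp [gsp]
    refine ⟨?_, ?_, ?_, ?_⟩
    · intro c' hc'
      rw [getD_modify', if_neg (by exact fun h => hc' h.1.symm)]
      exact ih1 c' hc'
    · simp [List.length_modify, ih2]
    · rw [getD_modify', if_pos ⟨rfl, hlen'⟩, List.length_set]
      exact ih3
    · intro i
      rw [getD_modify', if_pos ⟨rfl, hlen'⟩, getD_set', hv]
      by_cases hi : i = m + 1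
      · subst hi
        rw [if_pos ⟨rfl, by omega⟩, if_pos (le_refl _)]
      · rw [if_neg (by exact fun h => hi h.1.symm), ih4 i]
        split_ifs <;> first | rfl | omega

-- outer loop of port A
theorem outer_fill (T : List Int) (n K : Nat) (hn : 0 < n) (hK : 0 < K)
    (fInit : List (List Int))
    (hlen : fInit.length = K)
    (hrowlen : ∀ c', c' < K → (fInit.getD c' []).length = n)
    (hrows : ∀ c' i, (fInit.getD c' []).getD i 0 = if c' = 0 ∧ i < n then gsp T c' i else 0) :
    ∀ c, c ≤ K - 1 →
      (((List.range' 1 c).foldl (outerA T n) fInit).length = K) ∧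
      (∀ c', c' < K → ((((List.range' 1 c).foldl (outerA T n) fInit).getD c' []).length = n)) ∧
      (∀ c' i, ((((List.range' 1 c).foldl (outerA T n) fInit).getD c' []).getD i 0)
          = if c' ≤ c ∧ i < n then gsp T c' i else 0) := by
  intro c
  induction c with
  | zero =>
    intro _
    simp only [List.range'_zero, List.foldl_nil]
    refine ⟨hlen, hrowlen, fun c' i => ?_⟩
    rw [hrows c' i]
    split_ifs <;> first | rfl | omega
  | succ c ih =>
    intro hc
    obtain ⟨ih1, ih2, ih3⟩ := ih (by omega)
    rw [range'_concat_one, List.foldl_append]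
    set f' := (List.range' 1 c).foldl (outerA T n) fInit with hf'
    have h1m : 1 + c = c + 1 := Nat.add_comm 1 c
    simp only [List.foldl_cons, List.foldl_nil, outerA, h1m]
    have hcK' : c + 1 < K := by omega
    have hlen' : c + 1 < f'.length := by omega
    set g0 := f'.modify (c+1) (fun r => r.set 0 (T.getD 0 0)) with hg0
    have hg0len : g0.length = K := by simp [hg0, List.length_modify, ih1]
    have hg0ne : ∀ c', c' ≠ c + 1 → g0.getD c' [] = f'.getD c' [] := by
      intro c' hc'
      rw [hg0, getD_modify', if_neg (by exact fun h => hc' h.1.symm)]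
    have hg0row : g0.getD (c+1) [] = (f'.getD (c+1) []).set 0 (T.getD 0 0) := by
      rw [hg0, getD_modify', if_pos ⟨rfl, hlen'⟩]
    have hrowlen' : (f'.getD (c+1) []).length = n := ih2 (c+1) hcK'
    have hg0rlen : (g0.getD (c+1) []).length = n := by
      rw [hg0row, List.length_set]; exact hrowlen'
    have hg0r : ∀ i, (g0.getD (c+1) []).getD i 0 = if i = 0 then gsp T (c+1) 0 else 0 := by
      intro i
      rw [hg0row, getD_set']
      by_cases hi : i = 0
      · subst hi
        rw [if_pos ⟨rfl, by omega⟩, if_pos rfl]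
        simp [gsp]
      · rw [if_neg (by exact fun h => hi h.1.symm), if_neg hi, ih3 (c+1) i]
        rw [if_neg (by omega)]
    have hg0prev : ∀ i, (g0.getD c []).getD i 0 = if i < n then gsp T c i else 0 := by
      intro i
      rw [hg0ne c (by omega), ih3 c i]
      split_ifs <;> first | rfl | omega
    obtain ⟨r1, r2, r3, r4⟩ := rowc_fill T n c g0 (by omega) hg0prev hg0rlen hg0r (n-1) (le_refl _)
    refine ⟨by rw [r2, hg0len], ?_, ?_⟩
    · intro c' hc'
      by_cases h : c' = c + 1
      · subst h; exact r3
      · rw [r1 c' h, hg0ne c' h]; exact ih2 c' hc'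
    · intro c' i
      by_cases h : c' = c + 1
      · subst h
        rw [r4 i]
        split_ifs <;> first | rfl | omega
      · rw [r1 c' h, hg0ne c' h, ih3 c' i]
        split_ifs <;> first | rfl | omega

theorem foldl_max_bmax (T : List Int) (kk : Nat) :
    ∀ m, ((List.range' 1 m).map (gsp T kk)).foldl max (gsp T kk 0) = bmaxsp T kk m := by
  intro m
  induction m with
  | zero => simp [bmaxsp]
  | succ m ih =>
    rw [range'_concat_one, List.map_append, List.foldl_append, ih]
    simp [bmaxsp, Nat.add_comm 1 m]

theorem kstrong_eq (T : List Int) (k : Int) (hne : T ≠ []) (hk : 0 ≤ k) :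
    kstrong T k = bmaxsp T k.toNat (T.length - 1) := by
  have hn : 0 < T.length := List.length_pos_iff.mpr hne
  have hKt : (k+1).toNat = k.toNat + 1 := by omega
  set n := T.length with hndef
  set K := k.toNat + 1 with hKdef
  rw [kstrong_unfold, hKt]
  set t0 := (List.replicate K (List.replicate n 0)).modify 0
      (fun r => r.set 0 (T.getD 0 0)) with ht0
  have hrepl : ∀ c', (List.replicate K (List.replicate n (0:Int))).getD c' []
      = if c' < K then List.replicate n (0:Int) else [] := by
    intro c'
    simp [List.getD_eq_getElem?_getD, List.getElem?_replicate]
    split_ifs <;> simp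
  have ht0len : t0.length = K := by simp [ht0, List.length_modify]
  have ht0pos : 0 < t0.length := by omega
  have ht0row0 : t0.getD 0 [] = (List.replicate n (0:Int)).set 0 (T.getD 0 0) := by
    rw [ht0, getD_modify', if_pos ⟨rfl, by simp; omega⟩, hrepl 0, if_pos (by omega)]
  have ht0ne : ∀ c', c' ≠ 0 → t0.getD c' [] = if c' < K then List.replicate n (0:Int) else [] := by
    intro c' hc'
    rw [ht0, getD_modify', if_neg (by exact fun h => hc' h.1.symm), hrepl c']
  have hgetr : ∀ i, (List.replicate n (0:Int)).getD i 0 = 0 := by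
    intro i
    simp [List.getD_eq_getElem?_getD, List.getElem?_replicate]
    split_ifs <;> simp
  have hr0len : (t0.getD 0 []).length = n := by rw [ht0row0]; simp
  have hr0 : ∀ i, (t0.getD 0 []).getD i 0 = if i = 0 then gsp T 0 0 else 0 := by
    intro i
    rw [ht0row0, getD_set']
    by_cases hi : i = 0
    · subst hi
      rw [if_pos ⟨rfl, by simp; omega⟩, if_pos rfl]
      simp [gsp]
    · rw [if_neg (by exact fun h => hi h.1.symm), if_neg hi, hgetr i]
  obtain ⟨f1, f2, f3, f4⟩ := row0_fill T n t0 ht0pos hr0len hr0 (n-1) (le_refl _)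
  set fInit := (List.range' 1 (n-1)).foldl (stepA0 T) t0 with hfInit
  have hIlen : fInit.length = K := by rw [f2, ht0len]
  have hIrowlen : ∀ c', c' < K → (fInit.getD c' []).length = n := by
    intro c' hc'
    by_cases h : c' = 0
    · subst h; exact f3
    · rw [f1 c' h, ht0ne c' h, if_pos hc']; simp
  have hIrows : ∀ c' i, (fInit.getD c' []).getD i 0 = if c' = 0 ∧ i < n then gsp T c' i else 0 := by
    intro c' i
    by_cases h : c' = 0
    · subst h
      rw [f4 i]
      split_ifs <;> first | rfl | omega
    · rw [f1 c' h, ht0ne c' h]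
      by_cases h1 : c' < K
      · rw [if_pos h1, hgetr i, if_neg (fun hh => h hh.1)]
      · rw [if_neg h1, if_neg (fun hh => h hh.1)]
        simp
  obtain ⟨o1, o2, o3⟩ := outer_fill T n K hn (by omega) fInit hIlen hIrowlen hIrows
      k.toNat (by omega)
  set fFin := (List.range' 1 k.toNat).foldl (outerA T n) fInit with hfFin
  have hrow : fFin.getD k.toNat [] = (List.range n).map (gsp T k.toNat) := by
    apply List.ext_getElem
    · rw [o2 k.toNat (by omega)]; simp
    · intro i h1 h2
      have hin : i < n := by rwa [o2 k.toNat (by omega)] at h1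
      have hD := o3 k.toNat i
      rw [if_pos ⟨le_refl _, hin⟩] at hD
      rw [List.getD_eq_getElem _ _ h1] at hD
      rw [hD]
      simp
  rw [hrow]
  obtain ⟨m, hm⟩ : ∃ m, n = m + 1 := ⟨n - 1, by omega⟩
  rw [hm, range_succ_cons, List.map_cons, PySem.List.max?_id_cons]
  simp only [Option.getD_some]
  rw [foldl_max_bmax T k.toNat m]
  simp

-- ===== B-side proofs: the memo dict only ever holds correct DP values =====

-- every cached value at a nonnegative budget c is the DP value gsp T c i
def InvB (T : List Int) (m : PySem.Dict (Int × Int) Int) : Prop :=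
  ∀ (c : Int) (i : Nat) (v : Int), 0 ≤ c → m.get? (c, (i : Int)) = some v → v = gsp T c.toNat i

theorem invB_empty (T : List Int) : InvB T PySem.Dict.empty := by
  intro c i v _ h
  rw [PySem.Dict.get?_empty] at h
  exact absurd h (by simp)

theorem invB_insert (T : List Int) (m : PySem.Dict (Int × Int) Int) (hm : InvB T m)
    (c : Int) (i : Nat) (v : Int) (hv : 0 ≤ c → v = gsp T c.toNat i) :
    InvB T (m.insert (c, (i : Int)) v) := by
  intro c' i' v' hc' h
  rw [PySem.Dict.get?_insert] at h
  split_ifs at h with he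
  · obtain ⟨h1, h2⟩ := Prod.mk.injEq .. ▸ he
    have : i' = i := by exact_mod_cast h2
    subst h1 this
    cases h
    exact hv hc'
  · exact hm c' i' v' hc' h

theorem bestB_correct (T : List Int) :
    ∀ (i : Nat) (c : Int) (m : PySem.Dict (Int × Int) Int), 0 ≤ c → InvB T m →
      (bestB T c i m).1 = gsp T c.toNat i ∧ InvB T (bestB T c i m).2 := by
  intro i
  induction i with
  | zero =>
    intro c m hc hm
    rw [bestB]
    cases h : m.get? (c, ((0:Nat) : Int)) with
    | some v =>
      exact ⟨hm c 0 v hc h, hm⟩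
    | none =>
      refine ⟨by simp [gsp], invB_insert T m hm c 0 _ (fun _ => by simp [gsp])⟩
  | succ j ih =>
    intro c m hc hm
    rw [bestB]
    cases h : m.get? (c, ((j+1:Nat) : Int)) with
    | some v =>
      exact ⟨hm c (j+1) v hc h, hm⟩
    | none =>
      by_cases hc0 : c = 0
      · subst hc0
        obtain ⟨ihv, ihm⟩ := ih 0 m le_rfl hm
        simp only [if_pos rfl]
        have hval : max 0 (bestB T 0 j m).1 + T.getD (j+1) 0 = gsp T 0 (j+1) := by
          rw [ihv]; simp [gsp]
        exact ⟨hval, invB_insert T _ ihm 0 (j+1) _ (fun _ => hval.symm ▸ rfl)⟩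
      · obtain ⟨ihv1, ihm1⟩ := ih c m hc hm
        have hc1 : 0 ≤ c - 1 := by omega
        obtain ⟨ihv2, ihm2⟩ := ih (c-1) (bestB T c j m).2 hc1 ihm1
        simp only [if_neg hc0]
        obtain ⟨d, hd⟩ : ∃ d : Nat, c.toNat = d + 1 := ⟨c.toNat - 1, by omega⟩
        have hd1 : (c-1).toNat = d := by omega
        have hval : max (max 0 (bestB T c j m).1 + T.getD (j+1) 0)
            (bestB T (c-1) j (bestB T c j m).2).1 = gsp T c.toNat (j+1) := by
          rw [ihv1, ihv2, hd1, hd]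
          simp [gsp]
        exact ⟨hval, invB_insert T _ ihm2 c (j+1) _ (fun _ => hval.symm ▸ rfl)⟩

theorem foldD_correct (T : List Int) (k : Int) (hk : 0 ≤ k) :
    ∀ m : Nat,
      InvB T (((List.range m).foldl (stepD T k) (none, PySem.Dict.empty)).2) ∧
      ((List.range m).foldl (stepD T k) (none, PySem.Dict.empty)).1
        = if m = 0 then none else some (bmaxsp T k.toNat (m-1)) := by
  intro m
  induction m with
  | zero => exact ⟨invB_empty T, by simp⟩
  | succ n ih =>
    obtain ⟨ihm, ihv⟩ := ih
    rw [List.range_succ, List.foldl_append, List.foldl_cons, List.foldl_nil]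
    obtain ⟨bv, bm⟩ := bestB_correct T n k
      (((List.range n).foldl (stepD T k) (none, PySem.Dict.empty)).2) hk ihm
    refine ⟨bm, ?_⟩
    simp only [stepD, ihv]
    by_cases hn : n = 0
    · subst hn
      simp only [if_pos rfl]
      simpa [bmaxsp] using bv
    · obtain ⟨m', rfl⟩ : ∃ m', n = m' + 1 := ⟨n - 1, by omega⟩
      simp [bv, bmaxsp]

theorem kstrong_alt_eq (T : List Int) (k : Int) (hne : T ≠ []) (hk : 0 ≤ k) :
    kstrong_alt T k = bmaxsp T k.toNat (T.length - 1) := by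
  obtain ⟨j, hj⟩ : ∃ j, T.length = j + 1 :=
    ⟨T.length - 1, by have := List.length_pos_iff.mpr hne; omega⟩
  have h := (foldD_correct T k hk T.length).2
  unfold kstrong_alt
  rw [h, hj]
  simp

-- ===== VERDICT (by name: the statement is the Claim_ definition above) =====
theorem kstrong_spec : Claim_equal_kstrong := by
  intro T k _ hpre
  unfold Spec_kstrong
  rw [kstrong_eq T k hpre.1 hpre.2, kstrong_alt_eq T k hpre.1 hpre.2]
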